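-- pv_equiv track=rewrite | github.com/samgomena/Classwork | 320/lab5/scc.py | dfs
-- ===== SOURCE A (Python) =====
-- def dfs(graph):
--     visited  = set()
--     finished = []
--     def visit(v):
--         if v not in visited:
--             visited.add(v)
--             for w in graph[v]:
--                 visit(w)
--             finished.append(v)
--     for v in graph.keys():
--         visit(v)
--     return finished
-- ===== SOURCE B (Python) =====
-- def dfs(graph):
--     visited = set()
--     finished = []
--     stack = [(v, False) for v in graph]
--     stack.reverse()
--     while stack:
--         node, processed = stack.pop()
--         if processed:
--             finished.append(node)
--         elif node not in visited:
--             visited.add(node)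
--             stack.append((node, True))
--             for w in list(graph[node])[::-1]:
--                 stack.append((w, False))
--     return finished
-- ===== Notes on version B (the rewrite author's own statement) =====
-- stated objective: alternative
-- what changed: Replaces A's recursive nested visit() closure with an iterative DFS using an explicit stack of (vertex, processed) frames, so no Python recursion is used (and deep graphs no longer hit the recursion limit).
import Mathlib
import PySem

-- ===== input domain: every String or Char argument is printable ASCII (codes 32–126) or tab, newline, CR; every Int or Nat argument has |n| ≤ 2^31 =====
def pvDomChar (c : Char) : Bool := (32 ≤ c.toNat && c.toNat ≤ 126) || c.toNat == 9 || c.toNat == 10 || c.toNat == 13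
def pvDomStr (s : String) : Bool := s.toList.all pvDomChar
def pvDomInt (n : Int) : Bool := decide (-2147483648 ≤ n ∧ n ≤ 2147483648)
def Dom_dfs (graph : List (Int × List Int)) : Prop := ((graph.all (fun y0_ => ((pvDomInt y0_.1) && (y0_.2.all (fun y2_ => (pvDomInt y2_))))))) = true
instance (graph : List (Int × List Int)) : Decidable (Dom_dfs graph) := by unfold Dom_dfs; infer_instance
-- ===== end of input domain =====

-- B replaces A's recursive nested visit() with an iterative DFS over an explicit
-- stack of (vertex, processed) frames: a different decomposition, same cost.


-- number of keys of `g` not yet in `vis` (termination measure for both ports)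
def pvUnvis (g : PySem.Dict Int (List Int)) (vis : PySem.Set Int) : Nat :=
  (g.keys.filter (fun k => !(PySem.Set.contains vis k))).length

-- cited by the termination proof of dfsRun below
theorem pvUnvis_add_lt (g : PySem.Dict Int (List Int)) (vis : PySem.Set Int) (v : Int)
    (hk : g.get? v ≠ none) (hv : PySem.Set.contains vis v = false) :
    pvUnvis g (PySem.Set.add vis v) < pvUnvis g vis := by
  unfold pvUnvis
  have hsub : (g.keys.filter (fun k => !(PySem.Set.contains (PySem.Set.add vis v) k))).Sublist
      (g.keys.filter (fun k => !(PySem.Set.contains vis k))) := by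
    apply List.monotone_filter_right
    intro a ha
    simp only [Bool.not_eq_true', ← Bool.not_eq_true] at ha ⊢
    intro hmem
    exact ha ((PySem.Set.contains_iff _ _).mpr ((PySem.Set.mem_add _ _ _).mpr (Or.inl ((PySem.Set.contains_iff _ _).mp hmem))))
  rcases Nat.lt_or_ge (g.keys.filter (fun k => !(PySem.Set.contains (PySem.Set.add vis v) k))).length
      (g.keys.filter (fun k => !(PySem.Set.contains vis k))).length with h | h
  · exact h
  · exfalso
    have heq := hsub.eq_of_length_le h
    have hvk : v ∈ g.keys := by
      by_contra hnk
      exact hk ((PySem.Dict.get?_eq_none_iff_not_mem_keys g v).mpr hnk)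
    have hnv : v ∉ vis := by simpa using hv
    have hv2 : v ∈ g.keys.filter (fun k => !(PySem.Set.contains vis k)) := by
      simp [List.mem_filter, hvk, hnv]
    rw [← heq] at hv2
    have hv3 := (List.mem_filter.mp hv2).2
    simp at hv3

-- ===== PORT A =====
-- A's recursive `visit` ported with a fuel counter (depth never exceeds the number of
-- distinct keys, so fuel = graph.length + 1 is never exhausted; it only makes the
-- recursion structural). State = (visited set, finished list).
mutual
def visitA (g : PySem.Dict Int (List Int)) : Nat → (PySem.Set Int × List Int) → Int → (PySem.Set Int × List Int)
  | 0, s, _ => s                      -- fuel guard, unreachable from dfs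
  | Nat.succ f, s, v =>
    if PySem.Set.contains s.1 v then s
    else
      match g.get? v with
      | none => s                     -- Python raises KeyError here; excluded by Pre_dfs
      | some ns =>
        let s2 := visitListA g f (PySem.Set.add s.1 v, s.2) ns
        (s2.1, s2.2 ++ [v])
  termination_by f _ _ => (f, 0)
def visitListA (g : PySem.Dict Int (List Int)) : Nat → (PySem.Set Int × List Int) → List Int → (PySem.Set Int × List Int)
  | _, s, [] => s
  | f, s, w :: ws => visitListA g f (visitA g f s w) ws
  termination_by f _ ws => (f, ws.length + 1)
end

def dfs (graph : List (Int × List Int)) : List Int :=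
  (((PySem.Dict.ofList graph).keys).foldl
    (fun s v => visitA (PySem.Dict.ofList graph) (graph.length + 1) s v) (PySem.Set.empty, [])).2

-- ===== PORT B =====
-- B's while-loop over the explicit stack; the Python list's top is its end, here the
-- head: pushing the reversed neighbor list = prepending the list in order.
def dfsRun (g : PySem.Dict Int (List Int)) :
    PySem.Set Int → List Int → List (Int × Bool) → List Int
  | _, finished, [] => finished
  | visited, finished, (v, true) :: st => dfsRun g visited (finished ++ [v]) st
  | visited, finished, (v, false) :: st =>
    if _h1 : PySem.Set.contains visited v then dfsRun g visited finished st
    else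
      match _h2 : g.get? v with
      | none => dfsRun g visited finished st   -- Python raises KeyError here; excluded by Pre_dfs
      | some ns =>
        dfsRun g (PySem.Set.add visited v) finished (ns.map (fun w => (w, false)) ++ (v, true) :: st)
termination_by visited _ st => (pvUnvis g visited, st.length)
decreasing_by
  all_goals first
    | exact Prod.Lex.right _ (by simp)
    | exact Prod.Lex.left _ _ (pvUnvis_add_lt g visited v (by simp [_h2]) (by simpa using _h1))

def dfs_alt (graph : List (Int × List Int)) : List Int :=
  dfsRun (PySem.Dict.ofList graph) PySem.Set.empty []
    (((PySem.Dict.ofList graph).keys).map (fun v => (v, false)))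

-- ===== PRECONDITION & SPEC =====
-- Pre_dfs excludes exactly the graphs on which Python raises KeyError: some adjacency
-- list (as seen through the dict) mentions a vertex that is not a key.
def Pre_dfs (graph : List (Int × List Int)) : Prop :=
  ∀ k ∈ (PySem.Dict.ofList graph).keys,
    ∀ w ∈ (PySem.Dict.ofList graph).getD k [], w ∈ (PySem.Dict.ofList graph).keys
instance (graph : List (Int × List Int)) : Decidable (Pre_dfs graph) := by unfold Pre_dfs; infer_instance

def pvWitness_dfs : (List (Int × List Int)) := [(0, [1, 1]), (1, [0]), (2, [])]

def Spec_dfs (graph : List (Int × List Int)) (out : List Int) : Prop := out = dfs_alt graph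
instance (graph : List (Int × List Int)) (out : List Int) : Decidable (Spec_dfs graph out) := by unfold Spec_dfs; infer_instance

-- ===== CLAIM (what is proved, stated in full; the proofs are below) =====
def Claim_equal_dfs : Prop := ∀ (graph : List (Int × List Int)), Dom_dfs graph → Pre_dfs graph → Spec_dfs graph (dfs graph)

-- ===== LEMMAS AND PROOFS =====

-- the visited set only grows under visitListA (given that it does under visitA at the same fuel)
theorem mono_list_of (g : PySem.Dict Int (List Int)) (f : Nat)
    (hA : ∀ (s : PySem.Set Int × List Int) (v : Int) (x : Int), x ∈ s.1 → x ∈ (visitA g f s v).1) :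
    ∀ (ws : List Int) (s : PySem.Set Int × List Int) (x : Int), x ∈ s.1 → x ∈ (visitListA g f s ws).1 := by
  intro ws
  induction ws with
  | nil => intro s x hx; simpa [visitListA] using hx
  | cons w ws ih =>
    intro s x hx
    simp only [visitListA]
    exact ih _ x (hA s w x hx)

-- the visited set only grows under visitA
theorem mono_visit (g : PySem.Dict Int (List Int)) :
    ∀ (f : Nat) (s : PySem.Set Int × List Int) (v : Int) (x : Int), x ∈ s.1 → x ∈ (visitA g f s v).1 := by
  intro f
  induction f with
  | zero => intro s v x hx; simpa [visitA] using hx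
  | succ f ih =>
    intro s v x hx
    simp only [visitA]
    split
    · exact hx
    · cases hg : g.get? v with
      | none => simpa using hx
      | some ns =>
        exact mono_list_of g f ih ns _ x ((PySem.Set.mem_add _ _ _).mpr (Or.inl hx))

theorem pvUnvis_le_of_subset (g : PySem.Dict Int (List Int)) (vis vis' : PySem.Set Int)
    (h : ∀ x, x ∈ vis → x ∈ vis') : pvUnvis g vis' ≤ pvUnvis g vis := by
  unfold pvUnvis
  apply List.Sublist.length_le
  apply List.monotone_filter_right
  intro a ha
  simp only [Bool.not_eq_true'] at ha ⊢
  by_contra hc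
  simp only [Bool.not_eq_false] at hc
  exact absurd (h a ((PySem.Set.contains_iff _ _).mp hc)) (by simpa using ha)

-- one recursive visit equals running the stack machine on one unprocessed frame
theorem run_eq_visit (g : PySem.Dict Int (List Int)) :
    ∀ (f : Nat) (s : PySem.Set Int × List Int) (v : Int) (st : List (Int × Bool)),
      pvUnvis g s.1 < f →
      dfsRun g s.1 s.2 ((v, false) :: st) = dfsRun g (visitA g f s v).1 (visitA g f s v).2 st := by
  intro f
  induction f with
  | zero => intro s v st h; omega
  | succ f ih =>
    intro s v st h
    have hlist : ∀ (ws : List Int) (s' : PySem.Set Int × List Int) (st' : List (Int × Bool)),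
        pvUnvis g s'.1 < f →
        dfsRun g s'.1 s'.2 (ws.map (fun w => (w, false)) ++ st') =
          dfsRun g (visitListA g f s' ws).1 (visitListA g f s' ws).2 st' := by
      intro ws
      induction ws with
      | nil => intro s' st' _; simp [visitListA]
      | cons w ws ihw =>
        intro s' st' hlt
        simp only [List.map_cons, List.cons_append, visitListA]
        rw [ih s' w _ hlt]
        exact ihw (visitA g f s' w) st'
          (lt_of_le_of_lt (pvUnvis_le_of_subset g _ _ (fun x hx => mono_visit g f s' w x hx)) hlt)
    simp only [visitA]
    cases hc : PySem.Set.contains s.1 v with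
    | true =>
      have hv : v ∈ s.1 := (PySem.Set.contains_iff _ _).mp hc
      rw [dfsRun]
      simp [hv]
    | false =>
      have hnv : v ∉ s.1 := by simpa using hc
      cases hg : g.get? v with
      | none =>
        rw [dfsRun, dif_neg (by simpa using hnv)]
        split
        · simp
        · rename_i ns h2; rw [hg] at h2; cases h2
      | some ns =>
        rw [dfsRun, dif_neg (by simpa using hnv)]
        split
        · rename_i h2; rw [hg] at h2; cases h2
        · rename_i ns' h2
          rw [hg] at h2
          injection h2 with he
          subst he
          have hlt1 : pvUnvis g (PySem.Set.add s.1 v) < f :=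
            lt_of_lt_of_le (pvUnvis_add_lt g s.1 v (by simp [hg]) hc) (Nat.lt_succ_iff.mp h)
          have hrun := hlist ns (PySem.Set.add s.1 v, s.2) ((v, true) :: st) hlt1
          simp only at hrun
          rw [hrun, dfsRun]
          simp

-- the outer for-loop over the keys equals running the stack machine on all initial frames
theorem run_eq_foldl (g : PySem.Dict Int (List Int)) (f : Nat) :
    ∀ (ks : List Int) (vis : PySem.Set Int) (fin : List Int),
      pvUnvis g vis < f →
      dfsRun g vis fin (ks.map (fun v => (v, false))) =
        (ks.foldl (fun s v => visitA g f s v) (vis, fin)).2 := by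
  intro ks
  induction ks with
  | nil => intro vis fin _; simp [dfsRun]
  | cons k ks ih =>
    intro vis fin h
    simp only [List.map_cons, List.foldl_cons]
    rw [run_eq_visit g f (vis, fin) k _ h]
    have hle := pvUnvis_le_of_subset g vis (visitA g f (vis, fin) k).1
      (fun x hx => mono_visit g f (vis, fin) k x hx)
    have := ih (visitA g f (vis, fin) k).1 (visitA g f (vis, fin) k).2 (lt_of_le_of_lt hle h)
    simpa using this

theorem keys_update_length (ps : List (Int × List Int)) :
    ∀ (d : PySem.Dict Int (List Int)), (d.update ps).keys.length ≤ d.keys.length + ps.length := by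
  induction ps with
  | nil => intro d; simp [PySem.Dict.update]
  | cons p ps ih =>
    intro d
    have : d.update (p :: ps) = (d.insert p.1 p.2).update ps := by
      simp [PySem.Dict.update]
    rw [this]
    have h2 : (d.insert p.1 p.2).keys.length ≤ d.keys.length + 1 := by
      cases hc : d.contains p.1 with
      | true => rw [PySem.Dict.keys_insert_of_contains d p.2 hc]; omega
      | false => rw [PySem.Dict.keys_insert_of_not_contains d p.2 hc]; simp
    calc ((d.insert p.1 p.2).update ps).keys.length
        ≤ (d.insert p.1 p.2).keys.length + ps.length := ih _
      _ ≤ d.keys.length + (p :: ps).length := by simp; omega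

-- ===== VERDICT (by name: the statement is the Claim_ definition above) =====
theorem dfs_spec : Claim_equal_dfs := by
  intro graph _ _
  unfold Spec_dfs dfs dfs_alt
  rw [run_eq_foldl]
  have h1 : pvUnvis (PySem.Dict.ofList graph) PySem.Set.empty ≤ (PySem.Dict.ofList graph).keys.length :=
    List.length_filter_le _ _
  have h2 := keys_update_length graph PySem.Dict.empty
  simp only [PySem.Dict.ofList] at *
  simp only [PySem.Dict.keys_empty, List.length_nil] at h2
  omega
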